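-- pv_equiv track=rewrite | github.com/deottamprasad/Healthcare_Fraud_Detection_Project | src/pre_detection/packager.py | _generate_hypothesis
-- ===== SOURCE A (Python) =====
-- def _generate_hypothesis(anomalies, event):
--     """
--     Generates a simple, rule-based hypothesis for the LLM,
--     prioritized by severity.
--     """
--     # Get the root ID for each anomaly (e.g., "R1", "B7")
--     root_anomalies = {a.split(':')[0] for a in anomalies}
--
--     # Priority 1: Data Integrity / Device Tampering (Most Severe)
--     if any(rule in root_anomalies for rule in ["R8", "R9", "R10", "B7", "B8", "B9", "B10"]):
--         return "Potential device tampering or critical data integrity failure."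
--
--     # Priority 2: Data Exfiltration
--     elif "B1" in root_anomalies:
--         return "Potential data exfiltration attempt (high-volume access)."
--
--     # Priority 3: Privacy Violations
--     elif "R4" in root_anomalies:
--         return "Potential privacy violation (snooping on discharged patient)."
--
--     # Priority 4: Privilege/Role Violations
--     elif any(rule in root_anomalies for rule in ["R3", "R5", "R6"]):
--         return "Potential role-based privilege violation or unauthorized action."
--
--     # Priority 5: Suspicious Login Patterns
--     elif any(rule in root_anomalies for rule in ["R7", "B3", "B4"]):
--         return "Suspicious login pattern detected (e.g., new IP, high failures)."
--
--     # Priority 6: Off-Shift Access (Lowest Priority Anomaly)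
--     elif "R1" in root_anomalies:
--         return "Potential unauthorized access by off-shift employee."
--
--     # Default fallback
--     return "General suspicious activity detected."
-- ===== SOURCE B (Python) =====
-- # Table-driven re-implementation: one dict maps each rule ID to a priority,
-- # one pass over the anomalies tracks the minimum priority, and a second dict
-- # maps that priority to the message (7 = no rule matched -> fallback).
-- _RULE_PRIORITY = {
--     "R8": 1, "R9": 1, "R10": 1, "B7": 1, "B8": 1, "B9": 1, "B10": 1,
--     "B1": 2,
--     "R4": 3,
--     "R3": 4, "R5": 4, "R6": 4,
--     "R7": 5, "B3": 5, "B4": 5,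
--     "R1": 6,
-- }
--
-- _PRIORITY_MESSAGE = {
--     1: "Potential device tampering or critical data integrity failure.",
--     2: "Potential data exfiltration attempt (high-volume access).",
--     3: "Potential privacy violation (snooping on discharged patient).",
--     4: "Potential role-based privilege violation or unauthorized action.",
--     5: "Suspicious login pattern detected (e.g., new IP, high failures).",
--     6: "Potential unauthorized access by off-shift employee.",
-- }
--
--
-- def _generate_hypothesis(anomalies, event):
--     best = 7
--     for a in anomalies:
--         p = _RULE_PRIORITY.get(a.split(':')[0], 7)
--         if p < best:
--             best = p
--     return _PRIORITY_MESSAGE.get(best, "General suspicious activity detected.")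
-- ===== Notes on version B (the rewrite author's own statement) =====
-- stated objective: simpler
-- what changed: Replaced the six priority-ordered set-membership scans with a rule->priority dict and a single pass over the anomalies tracking the minimum priority, then one message lookup.
import Mathlib
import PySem

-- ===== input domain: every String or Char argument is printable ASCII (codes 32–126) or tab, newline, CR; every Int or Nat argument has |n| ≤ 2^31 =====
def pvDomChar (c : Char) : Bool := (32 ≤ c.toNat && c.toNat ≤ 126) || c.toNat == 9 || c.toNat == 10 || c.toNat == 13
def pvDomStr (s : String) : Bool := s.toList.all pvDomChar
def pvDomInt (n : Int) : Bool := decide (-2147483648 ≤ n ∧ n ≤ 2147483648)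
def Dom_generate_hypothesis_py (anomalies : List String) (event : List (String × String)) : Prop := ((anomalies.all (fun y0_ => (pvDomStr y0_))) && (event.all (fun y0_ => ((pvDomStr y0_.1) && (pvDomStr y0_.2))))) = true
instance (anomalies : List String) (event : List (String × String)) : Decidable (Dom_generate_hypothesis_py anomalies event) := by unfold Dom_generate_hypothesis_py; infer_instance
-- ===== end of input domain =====

-- B replaces A's six priority-ordered set-membership scans by a rule→priority table,
-- one minimum-tracking pass over the anomalies, and a priority→message lookup (simpler).

-- shared helper: a.split(':')[0].  ':' is a nonempty separator, so split? is `some`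
-- and the resulting list is nonempty: the [0] index never raises (getD/headD never default).
def pvRoot (a : String) : String := ((PySem.Str.split? a ":").getD []).headD ""

-- ===== PORT A =====
def generate_hypothesis_py (anomalies : List String) (event : List (String × String)) : String :=
  let root_anomalies : PySem.Set String := PySem.Set.ofList (anomalies.map pvRoot)
  if ["R8", "R9", "R10", "B7", "B8", "B9", "B10"].any (fun rule => PySem.Set.contains root_anomalies rule) then
    "Potential device tampering or critical data integrity failure."
  else if PySem.Set.contains root_anomalies "B1" then
    "Potential data exfiltration attempt (high-volume access)."
  else if PySem.Set.contains root_anomalies "R4" then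
    "Potential privacy violation (snooping on discharged patient)."
  else if ["R3", "R5", "R6"].any (fun rule => PySem.Set.contains root_anomalies rule) then
    "Potential role-based privilege violation or unauthorized action."
  else if ["R7", "B3", "B4"].any (fun rule => PySem.Set.contains root_anomalies rule) then
    "Suspicious login pattern detected (e.g., new IP, high failures)."
  else if PySem.Set.contains root_anomalies "R1" then
    "Potential unauthorized access by off-shift employee."
  else
    "General suspicious activity detected."

-- ===== PORT B =====
-- _RULE_PRIORITY / _PRIORITY_MESSAGE are dict literals with pairwise-distinct keys,
-- ported as association lists; dict.get(k, d) = (·.lookup k).getD d (first match).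
def pvRulePriority : List (String × Nat) :=
  [("R8", 1), ("R9", 1), ("R10", 1), ("B7", 1), ("B8", 1), ("B9", 1), ("B10", 1),
   ("B1", 2), ("R4", 3), ("R3", 4), ("R5", 4), ("R6", 4), ("R7", 5), ("B3", 5), ("B4", 5),
   ("R1", 6)]

def pvPriorityMessage : List (Nat × String) :=
  [(1, "Potential device tampering or critical data integrity failure."),
   (2, "Potential data exfiltration attempt (high-volume access)."),
   (3, "Potential privacy violation (snooping on discharged patient)."),
   (4, "Potential role-based privilege violation or unauthorized action."),
   (5, "Suspicious login pattern detected (e.g., new IP, high failures)."),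
   (6, "Potential unauthorized access by off-shift employee.")]

def generate_hypothesis_py_alt (anomalies : List String) (event : List (String × String)) : String :=
  let best := anomalies.foldl
    (fun best a =>
      let p := (pvRulePriority.lookup (pvRoot a)).getD 7
      if p < best then p else best) 7
  (pvPriorityMessage.lookup best).getD "General suspicious activity detected."

-- ===== PRECONDITION & SPEC =====
def Spec_generate_hypothesis_py (anomalies : List String) (event : List (String × String)) (out : String) : Prop := out = generate_hypothesis_py_alt anomalies event
instance (anomalies : List String) (event : List (String × String)) (out : String) : Decidable (Spec_generate_hypothesis_py anomalies event out) := by unfold Spec_generate_hypothesis_py; infer_instance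

-- ===== CLAIM (what is proved, stated in full; the proofs are below) =====
def Claim_equal_generate_hypothesis_py : Prop := ∀ (anomalies : List String) (event : List (String × String)), Dom_generate_hypothesis_py anomalies event → Spec_generate_hypothesis_py anomalies event (generate_hypothesis_py anomalies event)

-- ===== LEMMAS AND PROOFS =====

-- the per-anomaly priority B computes
def pvF (a : String) : Nat := (pvRulePriority.lookup (pvRoot a)).getD 7

lemma pvLookup_eq (r : String) :
    (pvRulePriority.lookup r).getD 7 =
      (if r ∈ (["R8", "R9", "R10", "B7", "B8", "B9", "B10"] : List String) then 1
      else if r = "B1" then 2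
      else if r = "R4" then 3
      else if r ∈ (["R3", "R5", "R6"] : List String) then 4
      else if r ∈ (["R7", "B3", "B4"] : List String) then 5
      else if r = "R1" then 6
      else 7 : Nat) := by
  simp only [pvRulePriority, List.lookup]
  repeat' split
  all_goals simp_all [List.mem_cons]

-- membership bridges: Python's `rule in root_anomalies` over the set of roots
lemma pvContains_iff (xs : List String) (r : String) :
    PySem.Set.contains (PySem.Set.ofList (xs.map pvRoot)) r = true ↔ ∃ a ∈ xs, pvRoot a = r := by
  simp [PySem.Set.contains, PySem.Set.mem_ofList, List.mem_map, eq_comm]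

lemma pvAny_iff (xs : List String) (g : List String) :
    (g.any (fun rule => PySem.Set.contains (PySem.Set.ofList (xs.map pvRoot)) rule) = true) ↔
      ∃ a ∈ xs, pvRoot a ∈ g := by
  simp only [List.any_eq_true, pvContains_iff]
  constructor
  · rintro ⟨rule, hg, a, ha, rfl⟩; exact ⟨a, ha, hg⟩
  · rintro ⟨a, ha, hg⟩; exact ⟨pvRoot a, hg, a, ha, rfl⟩

-- characterisation of B's minimum-tracking fold
lemma pvFold_char (L : List String) (c : Nat) :
    (L.foldl (fun b a => if pvF a < b then pvF a else b) c ≤ c) ∧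
    (L.foldl (fun b a => if pvF a < b then pvF a else b) c = c ∨
      ∃ a ∈ L, L.foldl (fun b a => if pvF a < b then pvF a else b) c = pvF a) ∧
    (∀ a ∈ L, L.foldl (fun b a => if pvF a < b then pvF a else b) c ≤ pvF a) := by
  induction L generalizing c with
  | nil => simp
  | cons x xs ih =>
    simp only [List.foldl_cons]
    rcases ih (if pvF x < c then pvF x else c) with ⟨h1, h2, h3⟩
    refine ⟨?_, ?_, ?_⟩
    · exact le_trans h1 (by split_ifs with h <;> omega)
    · rcases h2 with h | ⟨a, ha, he⟩
      · by_cases hx : pvF x < c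
        · exact Or.inr ⟨x, by simp, by rw [if_pos hx] at h ⊢; exact h⟩
        · exact Or.inl (by rw [if_neg hx] at h ⊢; exact h)
      · exact Or.inr ⟨a, by simp [ha], he⟩
    · intro a ha
      rcases List.mem_cons.mp ha with rfl | ha'
      · exact le_trans h1 (by split_ifs with h <;> omega)
      · exact h3 a ha'

-- ===== VERDICT (by name: the statement is the Claim_ definition above) =====
-- every priority is at least 1
lemma pvF_pos (a : String) : 1 ≤ pvF a := by
  show 1 ≤ (pvRulePriority.lookup (pvRoot a)).getD 7
  rw [pvLookup_eq]; split_ifs <;> omega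

theorem generate_hypothesis_py_spec : Claim_equal_generate_hypothesis_py := by
  unfold Claim_equal_generate_hypothesis_py
  intro anomalies event _
  unfold Spec_generate_hypothesis_py generate_hypothesis_py generate_hypothesis_py_alt
  simp only []
  -- B's fold is the pvF-minimum fold
  have hfold : (anomalies.foldl
      (fun best a =>
        let p := (pvRulePriority.lookup (pvRoot a)).getD 7
        if p < best then p else best) 7)
      = anomalies.foldl (fun b a => if pvF a < b then pvF a else b) 7 := rfl
  rw [hfold]
  obtain ⟨hc7, hval, hall⟩ := pvFold_char anomalies 7
  set r := anomalies.foldl (fun b a => if pvF a < b then pvF a else b) 7 with hrdef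
  by_cases h1 : ∃ a ∈ anomalies, pvRoot a ∈ (["R8", "R9", "R10", "B7", "B8", "B9", "B10"] : List String)
  · rw [if_pos ((pvAny_iff _ _).mpr h1)]
    obtain ⟨a0, ha0, hm⟩ := h1
    have hf : pvF a0 = 1 := by
      show (pvRulePriority.lookup (pvRoot a0)).getD 7 = 1
      rw [pvLookup_eq, if_pos hm]
    have h1' := hall a0 ha0
    rw [hf] at h1'
    have hr : r = 1 := by
      rcases hval with h | ⟨b, _, hfb⟩
      · omega
      · have := pvF_pos b
        omega
    rw [hr]; rfl
  · rw [if_neg (fun hc => h1 ((pvAny_iff _ _).mp hc))]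
    by_cases h2 : ∃ a ∈ anomalies, pvRoot a = "B1"
    · rw [if_pos ((pvContains_iff _ _).mpr h2)]
      obtain ⟨a0, ha0, hm⟩ := h2
      have hf : pvF a0 = 2 := by
        show (pvRulePriority.lookup (pvRoot a0)).getD 7 = 2
        rw [pvLookup_eq, hm]; decide
      have hlb : ∀ a ∈ anomalies, 2 ≤ pvF a := by
        intro a ha
        show 2 ≤ (pvRulePriority.lookup (pvRoot a)).getD 7
        rw [pvLookup_eq]
        have n1 : pvRoot a ∉ (["R8", "R9", "R10", "B7", "B8", "B9", "B10"] : List String) :=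
          fun hmem => h1 ⟨a, ha, hmem⟩
        rw [if_neg n1]; split_ifs <;> omega
      have h2' := hall a0 ha0
      rw [hf] at h2'
      have hr : r = 2 := by
        rcases hval with h | ⟨b, hb, hfb⟩
        · omega
        · have := hlb b hb; omega
      rw [hr]; rfl
    · rw [if_neg (fun hc => h2 ((pvContains_iff _ _).mp hc))]
      by_cases h3 : ∃ a ∈ anomalies, pvRoot a = "R4"
      · rw [if_pos ((pvContains_iff _ _).mpr h3)]
        obtain ⟨a0, ha0, hm⟩ := h3
        have hf : pvF a0 = 3 := by
          show (pvRulePriority.lookup (pvRoot a0)).getD 7 = 3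
          rw [pvLookup_eq, hm]; decide
        have hlb : ∀ a ∈ anomalies, 3 ≤ pvF a := by
          intro a ha
          show 3 ≤ (pvRulePriority.lookup (pvRoot a)).getD 7
          rw [pvLookup_eq]
          rw [if_neg (fun hmem => h1 ⟨a, ha, hmem⟩),
              if_neg (fun hmem => h2 ⟨a, ha, hmem⟩)]
          split_ifs <;> omega
        have h3' := hall a0 ha0
        rw [hf] at h3'
        have hr : r = 3 := by
          rcases hval with h | ⟨b, hb, hfb⟩
          · omega
          · have := hlb b hb; omega
        rw [hr]; rfl
      · rw [if_neg (fun hc => h3 ((pvContains_iff _ _).mp hc))]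
        by_cases h4 : ∃ a ∈ anomalies, pvRoot a ∈ (["R3", "R5", "R6"] : List String)
        · rw [if_pos ((pvAny_iff _ _).mpr h4)]
          obtain ⟨a0, ha0, hm⟩ := h4
          have hf : pvF a0 = 4 := by
            show (pvRulePriority.lookup (pvRoot a0)).getD 7 = 4
            rw [pvLookup_eq, if_neg (fun hmem => h1 ⟨a0, ha0, hmem⟩),
                if_neg (fun hmem => h2 ⟨a0, ha0, hmem⟩),
                if_neg (fun hmem => h3 ⟨a0, ha0, hmem⟩), if_pos hm]
          have hlb : ∀ a ∈ anomalies, 4 ≤ pvF a := by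
            intro a ha
            show 4 ≤ (pvRulePriority.lookup (pvRoot a)).getD 7
            rw [pvLookup_eq]
            rw [if_neg (fun hmem => h1 ⟨a, ha, hmem⟩),
                if_neg (fun hmem => h2 ⟨a, ha, hmem⟩),
                if_neg (fun hmem => h3 ⟨a, ha, hmem⟩)]
            split_ifs <;> omega
          have h4' := hall a0 ha0
          rw [hf] at h4'
          have hr : r = 4 := by
            rcases hval with h | ⟨b, hb, hfb⟩
            · omega
            · have := hlb b hb; omega
          rw [hr]; rfl
        · rw [if_neg (fun hc => h4 ((pvAny_iff _ _).mp hc))]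
          by_cases h5 : ∃ a ∈ anomalies, pvRoot a ∈ (["R7", "B3", "B4"] : List String)
          · rw [if_pos ((pvAny_iff _ _).mpr h5)]
            obtain ⟨a0, ha0, hm⟩ := h5
            have hf : pvF a0 = 5 := by
              show (pvRulePriority.lookup (pvRoot a0)).getD 7 = 5
              rw [pvLookup_eq, if_neg (fun hmem => h1 ⟨a0, ha0, hmem⟩),
                  if_neg (fun hmem => h2 ⟨a0, ha0, hmem⟩),
                  if_neg (fun hmem => h3 ⟨a0, ha0, hmem⟩),
                  if_neg (fun hmem => h4 ⟨a0, ha0, hmem⟩), if_pos hm]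
            have hlb : ∀ a ∈ anomalies, 5 ≤ pvF a := by
              intro a ha
              show 5 ≤ (pvRulePriority.lookup (pvRoot a)).getD 7
              rw [pvLookup_eq]
              rw [if_neg (fun hmem => h1 ⟨a, ha, hmem⟩),
                  if_neg (fun hmem => h2 ⟨a, ha, hmem⟩),
                  if_neg (fun hmem => h3 ⟨a, ha, hmem⟩),
                  if_neg (fun hmem => h4 ⟨a, ha, hmem⟩)]
              split_ifs <;> omega
            have h5' := hall a0 ha0
            rw [hf] at h5'
            have hr : r = 5 := by
              rcases hval with h | ⟨b, hb, hfb⟩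
              · omega
              · have := hlb b hb; omega
            rw [hr]; rfl
          · rw [if_neg (fun hc => h5 ((pvAny_iff _ _).mp hc))]
            by_cases h6 : ∃ a ∈ anomalies, pvRoot a = "R1"
            · rw [if_pos ((pvContains_iff _ _).mpr h6)]
              obtain ⟨a0, ha0, hm⟩ := h6
              have hf : pvF a0 = 6 := by
                show (pvRulePriority.lookup (pvRoot a0)).getD 7 = 6
                rw [pvLookup_eq, if_neg (fun hmem => h1 ⟨a0, ha0, hmem⟩),
                    if_neg (fun hmem => h2 ⟨a0, ha0, hmem⟩),
                    if_neg (fun hmem => h3 ⟨a0, ha0, hmem⟩),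
                    if_neg (fun hmem => h4 ⟨a0, ha0, hmem⟩),
                    if_neg (fun hmem => h5 ⟨a0, ha0, hmem⟩), if_pos hm]
              have hlb : ∀ a ∈ anomalies, 6 ≤ pvF a := by
                intro a ha
                show 6 ≤ (pvRulePriority.lookup (pvRoot a)).getD 7
                rw [pvLookup_eq]
                rw [if_neg (fun hmem => h1 ⟨a, ha, hmem⟩),
                    if_neg (fun hmem => h2 ⟨a, ha, hmem⟩),
                    if_neg (fun hmem => h3 ⟨a, ha, hmem⟩),
                    if_neg (fun hmem => h4 ⟨a, ha, hmem⟩),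
                    if_neg (fun hmem => h5 ⟨a, ha, hmem⟩)]
                split_ifs <;> omega
              have h6' := hall a0 ha0
              rw [hf] at h6'
              have hr : r = 6 := by
                rcases hval with h | ⟨b, hb, hfb⟩
                · omega
                · have := hlb b hb; omega
              rw [hr]; rfl
            · rw [if_neg (fun hc => h6 ((pvContains_iff _ _).mp hc))]
              have hlb : ∀ a ∈ anomalies, pvF a = 7 := by
                intro a ha
                show (pvRulePriority.lookup (pvRoot a)).getD 7 = 7
                rw [pvLookup_eq]
                rw [if_neg (fun hmem => h1 ⟨a, ha, hmem⟩),
                    if_neg (fun hmem => h2 ⟨a, ha, hmem⟩),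
                    if_neg (fun hmem => h3 ⟨a, ha, hmem⟩),
                    if_neg (fun hmem => h4 ⟨a, ha, hmem⟩),
                    if_neg (fun hmem => h5 ⟨a, ha, hmem⟩),
                    if_neg (fun hmem => h6 ⟨a, ha, hmem⟩)]
              have hr : r = 7 := by
                rcases hval with h | ⟨b, hb, hfb⟩
                · exact h
                · rw [hlb b hb] at hfb; exact hfb
              rw [hr]; rfl
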